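-- pv_equiv track=rewrite | github.com/Salman-Javaid-Hub/event-catalog-pipeline | python export_to_sheets.py | prepare_event_data
-- ===== SOURCE A (Python) =====
-- def prepare_event_data(events):
--     """Prepare event data."""
--     headers = [
--         "Event Name", "Event Date", "Event Type", "Description",
--         "Venue Name", "Venue Address", "Venue City", "Venue State", "Venue Zip",
--         "Venue Parking", "Venue Website",
--         "Registration URL", "Sponsorship URL", "Sponsorship Tiers", "Sponsorship Contact",
--         "Past Sponsors", "Dress Code", "Organizer ID"
--     ]
--     data = [headers]
--     for e in events:
--         data.append([
--             e.get("name"), str(e.get("date")), e.get("event_type"), e.get("description"),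
--             e.get("venue_name"), e.get("venue_address"), e.get("venue_city"), e.get("venue_state"), e.get("venue_zip"),
--             e.get("venue_parking"), e.get("venue_website"),
--             e.get("registration_url"), e.get("sponsorship_url"), e.get("sponsorship_tiers"), e.get("sponsorship_contact"),
--             e.get("past_sponsors"), e.get("dress_code"), e.get("organizer_id")
--         ])
--     return data
-- ===== SOURCE B (Python) =====
-- FIELDS = [
--     ("Event Name", "name"), ("Event Date", "date"),
--     ("Event Type", "event_type"), ("Description", "description"),
--     ("Venue Name", "venue_name"), ("Venue Address", "venue_address"),
--     ("Venue City", "venue_city"), ("Venue State", "venue_state"),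
--     ("Venue Zip", "venue_zip"), ("Venue Parking", "venue_parking"),
--     ("Venue Website", "venue_website"),
--     ("Registration URL", "registration_url"),
--     ("Sponsorship URL", "sponsorship_url"),
--     ("Sponsorship Tiers", "sponsorship_tiers"),
--     ("Sponsorship Contact", "sponsorship_contact"),
--     ("Past Sponsors", "past_sponsors"),
--     ("Dress Code", "dress_code"),
--     ("Organizer ID", "organizer_id"),
-- ]
--
--
-- def prepare_event_data(events):
--     """Prepare event data."""
--     # Build the table column by column (header on top of each column's
--     # values down the events), then transpose the columns into rows.
--     columns = [
--         [header] + [str(e.get(key)) if key == "date" else e.get(key)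
--                     for e in events]
--         for header, key in FIELDS
--     ]
--     return [list(row) for row in zip(*columns)]
-- ===== Notes on version B (the rewrite author's own statement) =====
-- stated objective: alternative
-- what changed: B builds the spreadsheet column-major (each column = header on top of that field's value per event) and then transposes with zip(*columns), instead of A's row-major loop appending one literal 18-element row per event.
import Mathlib
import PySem

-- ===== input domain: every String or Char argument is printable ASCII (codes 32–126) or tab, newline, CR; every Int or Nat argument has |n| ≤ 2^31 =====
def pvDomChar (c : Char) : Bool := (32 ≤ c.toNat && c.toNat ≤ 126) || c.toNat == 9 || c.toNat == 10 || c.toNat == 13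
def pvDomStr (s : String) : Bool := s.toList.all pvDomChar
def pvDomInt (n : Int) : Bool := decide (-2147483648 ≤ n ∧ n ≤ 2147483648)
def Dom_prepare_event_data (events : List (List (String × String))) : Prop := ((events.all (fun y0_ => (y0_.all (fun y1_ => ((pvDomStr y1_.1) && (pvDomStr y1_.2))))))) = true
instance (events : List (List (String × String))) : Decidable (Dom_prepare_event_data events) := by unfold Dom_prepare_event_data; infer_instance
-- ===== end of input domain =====

-- B builds the table column-major (header atop each field's values) and transposes with
-- zip(*columns), instead of A's row-major loop; alternative decomposition, same cost.

-- ===== PORT A =====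
-- str(e.get("date")): str(None) = "None", str of a string is itself
def pvStrOfOpt (o : Option String) : String :=
  match o with
  | some s => s
  | none => "None"

def prepare_event_data (events : List (List (String × String))) : List (List (Option String)) :=
  let headers : List (Option String) :=
    [some "Event Name", some "Event Date", some "Event Type", some "Description",
     some "Venue Name", some "Venue Address", some "Venue City", some "Venue State", some "Venue Zip",
     some "Venue Parking", some "Venue Website",
     some "Registration URL", some "Sponsorship URL", some "Sponsorship Tiers", some "Sponsorship Contact",
     some "Past Sponsors", some "Dress Code", some "Organizer ID"]
  events.foldl (fun data e =>
    let d := PySem.Dict.ofList e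
    data ++ [[d.get? "name", some (pvStrOfOpt (d.get? "date")), d.get? "event_type", d.get? "description",
      d.get? "venue_name", d.get? "venue_address", d.get? "venue_city", d.get? "venue_state", d.get? "venue_zip",
      d.get? "venue_parking", d.get? "venue_website",
      d.get? "registration_url", d.get? "sponsorship_url", d.get? "sponsorship_tiers", d.get? "sponsorship_contact",
      d.get? "past_sponsors", d.get? "dress_code", d.get? "organizer_id"]]) [headers]

-- ===== PORT B =====
def pvFields : List (String × String) :=
  [("Event Name", "name"), ("Event Date", "date"),
   ("Event Type", "event_type"), ("Description", "description"),
   ("Venue Name", "venue_name"), ("Venue Address", "venue_address"),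
   ("Venue City", "venue_city"), ("Venue State", "venue_state"),
   ("Venue Zip", "venue_zip"), ("Venue Parking", "venue_parking"),
   ("Venue Website", "venue_website"),
   ("Registration URL", "registration_url"),
   ("Sponsorship URL", "sponsorship_url"),
   ("Sponsorship Tiers", "sponsorship_tiers"),
   ("Sponsorship Contact", "sponsorship_contact"),
   ("Past Sponsors", "past_sponsors"),
   ("Dress Code", "dress_code"),
   ("Organizer ID", "organizer_id")]

-- termination helpers for pvTranspose (cited by its decreasing_by)
lemma pvSumTailLe {α : Type} (cols : List (List α)) :
    ((cols.map List.tail).map List.length).sum ≤ (cols.map List.length).sum := by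
  induction cols with
  | nil => simp
  | cons c t ih =>
    simp only [List.map_cons, List.sum_cons]
    have : c.tail.length ≤ c.length := by
      cases c <;> simp
    omega

lemma pvSumTailLt {α : Type} (cols : List (List α)) (h1 : cols ≠ [])
    (h2 : ∀ c ∈ cols, c ≠ []) :
    ((cols.map List.tail).map List.length).sum < (cols.map List.length).sum := by
  cases cols with
  | nil => exact absurd rfl h1
  | cons c t =>
    simp only [List.map_cons, List.sum_cons]
    have hc : c ≠ [] := h2 c (List.mem_cons_self ..)
    have : c.tail.length < c.length := by
      cases c with
      | nil => exact absurd rfl hc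
      | cons a l => simp
    have := pvSumTailLe t
    omega

-- zip(*columns): rows of firsts while every column is nonempty (stops at shortest; [] for no columns)
def pvTranspose {α : Type} (cols : List (List α)) : List (List α) :=
  if h : cols.isEmpty ∨ cols.any (·.isEmpty) then []
  else
    (cols.filterMap List.head?) :: pvTranspose (cols.map List.tail)
termination_by ((cols.map List.length).sum)
decreasing_by
  have h1 : cols ≠ [] := by intro he; exact h (Or.inl (by simp [he]))
  have h2 : ∀ c ∈ cols, c ≠ [] := by
    intro c hc he
    exact h (Or.inr (by rw [List.any_eq_true]; exact ⟨c, hc, by simp [he]⟩))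
  have := pvSumTailLt cols h1 h2
  simpa [Function.comp] using this

def prepare_event_data_alt (events : List (List (String × String))) : List (List (Option String)) :=
  let columns : List (List (Option String)) :=
    pvFields.map (fun f =>
      some f.1 :: events.map (fun e =>
        if f.2 == "date" then some (pvStrOfOpt ((PySem.Dict.ofList e).get? f.2))
        else (PySem.Dict.ofList e).get? f.2))
  pvTranspose columns

-- ===== PRECONDITION & SPEC =====
def Spec_prepare_event_data (events : List (List (String × String))) (out : List (List (Option String))) : Prop := out = prepare_event_data_alt events
instance (events : List (List (String × String))) (out : List (List (Option String))) : Decidable (Spec_prepare_event_data events out) := by unfold Spec_prepare_event_data; infer_instance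

-- ===== CLAIM (what is proved, stated in full; the proofs are below) =====
def Claim_equal_prepare_event_data : Prop := ∀ (events : List (List (String × String))), Dom_prepare_event_data events → Spec_prepare_event_data events (prepare_event_data events)

-- ===== LEMMAS AND PROOFS =====
lemma pvPrependFoldlAppend (l : List (List (String × String)))
    (f : List (String × String) → List (Option String)) (acc : List (List (Option String))) :
    l.foldl (fun data e => data ++ [f e]) acc = acc ++ l.map f := by
  induction l generalizing acc with
  | nil => simp
  | cons e t ih => simp [List.foldl, ih, List.append_assoc]

lemma pvTranspose_step {α β : Type} (fs : List β) (hfs : fs ≠ [])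
    (hd : β → α) (tl : β → List α) :
    pvTranspose (fs.map (fun f => hd f :: tl f)) = (fs.map hd) :: pvTranspose (fs.map tl) := by
  rw [pvTranspose]
  rw [dif_neg]
  · congr 1
    · rw [List.filterMap_map]
      simp [Function.comp]
    · rw [List.map_map]; rfl
  · rintro (h | h)
    · simp [List.isEmpty_iff] at h; exact hfs (by simpa using h)
    · simp [List.any_eq_true] at h

lemma pvTranspose_cols_of_rows {α β γ : Type} (fs : List β) (hfs : fs ≠ [])
    (cell : β → γ → α) (es : List γ) :
    pvTranspose (fs.map (fun f => es.map (cell f))) =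
      es.map (fun e => fs.map (fun f => cell f e)) := by
  induction es with
  | nil =>
    simp only [List.map_nil]
    obtain ⟨f, t, rfl⟩ : ∃ f t, fs = f :: t := by
      cases fs with
      | nil => exact absurd rfl hfs
      | cons f t => exact ⟨f, t, rfl⟩
    rw [pvTranspose, dif_pos (Or.inr (by simp))]
  | cons e es' ih =>
    simp only [List.map_cons]
    rw [pvTranspose_step fs hfs (fun f => cell f e) (fun f => es'.map (cell f)), ih]

-- ===== VERDICT (by name: the statement is the Claim_ definition above) =====
theorem prepare_event_data_spec : Claim_equal_prepare_event_data := by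
  intro events _
  show prepare_event_data events = prepare_event_data_alt events
  unfold prepare_event_data prepare_event_data_alt
  rw [pvPrependFoldlAppend]
  rw [pvTranspose_step pvFields (by simp [pvFields])
    (fun f => some f.1)
    (fun f => events.map (fun e =>
      if f.2 == "date" then some (pvStrOfOpt ((PySem.Dict.ofList e).get? f.2))
      else (PySem.Dict.ofList e).get? f.2))]
  rw [pvTranspose_cols_of_rows pvFields (by simp [pvFields])
    (fun f e => if f.2 == "date" then some (pvStrOfOpt ((PySem.Dict.ofList e).get? f.2))
      else (PySem.Dict.ofList e).get? f.2) events]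
  simp [pvFields]
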